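-- pv_equiv track=rewrite | github.com/vlasmirnov/CompBioScripts | get_frag_aln.py | saveTrueFragAligns
-- ===== SOURCE A (Python) =====
-- def saveTrueFragAligns(frags, sequences):
--     align = dict(sequences)
--     for tag in frags:
--         frag = str(frags[tag])
--         full = str(align[tag])
--         idx = full.replace("-","").find(frag)
--
--         found = 0
--         newString = []
--         for i in range(len(full)):
--             if full[i] != '-':
--                 if found >= idx and found < idx + len(frag):
--                     newString.append(full[i])
--                     assert full[i] == frag[found-idx]
--                 else:
--                     newString.append("-")
--                 found = found + 1
--             else:
--                 newString.append("-")
--         align[tag] = ''.join(newString)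
--     return align
-- ===== SOURCE B (Python) =====
-- def saveTrueFragAligns(frags, sequences):
--     align = dict(sequences)
--     for tag in frags:
--         frag = str(frags[tag])
--         full = str(align[tag])
--         idx = full.replace("-", "").find(frag)
--         positions = [i for i, c in enumerate(full) if c != '-']
--         out = ['-'] * len(full)
--         for p in positions[idx: idx + len(frag)]:
--             out[p] = full[p]
--         align[tag] = ''.join(out)
--     return align
-- ===== Notes on version B (the rewrite author's own statement) =====
-- stated objective: alternative
-- what changed: B first builds an explicit index of non-gap positions and writes the window positions[idx:idx+len(frag)] into a pre-filled '-' buffer by index assignment, instead of A's single stateful scan that compares a running non-gap counter against the window at every character.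
-- outside the precondition, e.g. on saveTrueFragAligns({'t': '?A'}, {'t': 'AB'}): A returns {'t': 'A-'}, B returns {'t': '--'}
import Mathlib
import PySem

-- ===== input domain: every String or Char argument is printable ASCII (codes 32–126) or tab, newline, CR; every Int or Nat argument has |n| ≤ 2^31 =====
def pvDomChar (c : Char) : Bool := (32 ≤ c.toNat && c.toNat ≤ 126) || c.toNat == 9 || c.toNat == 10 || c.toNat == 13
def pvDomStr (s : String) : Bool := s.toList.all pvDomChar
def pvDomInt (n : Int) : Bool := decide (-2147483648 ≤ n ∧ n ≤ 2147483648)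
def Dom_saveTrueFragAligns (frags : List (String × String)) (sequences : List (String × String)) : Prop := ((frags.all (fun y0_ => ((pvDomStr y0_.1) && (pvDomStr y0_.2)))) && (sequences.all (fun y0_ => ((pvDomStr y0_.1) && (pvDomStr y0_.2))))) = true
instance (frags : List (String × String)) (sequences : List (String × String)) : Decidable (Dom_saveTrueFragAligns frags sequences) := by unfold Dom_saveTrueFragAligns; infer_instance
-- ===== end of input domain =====

-- B rebuilds each masked row from an explicit index of non-gap positions (window slice + index
-- assignment into a '-' buffer) instead of A's stateful scan with a running non-gap counter;
-- same cost, different decomposition ("alternative").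


-- ===== PORT A =====
-- inner loop of A: `for i in range(len(full)):` building newString while counting non-gap chars in
-- `found` (iterating the characters directly, since i is only used as full[i]).  The `assert` always
-- holds under Pre_ (the fragment is found in the de-gapped string) and does not affect the returned
-- value, so it is not modelled; inputs on which it could fire are outside Pre_.
def pvFragA (frag full : List Char) : List Char :=
  let idx := PySem.Chars.find (PySem.Chars.replace full ['-'] []) frag
  (full.foldl (fun (st : Int × List Char) c =>
      if c ≠ '-' then
        if idx ≤ st.1 ∧ st.1 < idx + (frag.length : Int) then (st.1 + 1, st.2 ++ [c])
        else (st.1 + 1, st.2 ++ ['-'])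
      else (st.1, st.2 ++ ['-'])) ((0 : Int), ([] : List Char))).2

-- `align = dict(sequences)`, loop `for tag in frags` over the dict's keys, `align[tag] = ''.join(...)`
-- (''.join of a list of single characters is String.ofList); the dict is returned as its items list.
-- `align[tag]` / `frags[tag]` are ported as getD "": under Pre_ the keys are present (no KeyError).
def saveTrueFragAligns (frags : List (String × String)) (sequences : List (String × String)) : List (String × String) :=
  let fragsD := PySem.Dict.ofList frags
  (fragsD.keys.foldl (fun al tag =>
      al.insert tag (String.ofList (pvFragA (fragsD.getD tag "").toList (al.getD tag "").toList)))
    (PySem.Dict.ofList sequences)).items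

-- ===== PORT B =====
-- inner loop of B: positions = [i for i, c in enumerate(full) if c != '-'];
-- out = ['-'] * len(full); for p in positions[idx : idx + len(frag)]: out[p] = full[p]
def pvFragB (frag full : List Char) : List Char :=
  let idx := PySem.Chars.find (PySem.Chars.replace full ['-'] []) frag
  let positions := ((PySem.List.enumerate full).filter (fun p => p.2 ≠ '-')).map Prod.fst
  (PySem.List.slice positions (some idx) (some (idx + (frag.length : Int)))).foldl
    (fun out p => PySem.List.pySetD out p (PySem.List.pyGetD full p '-'))
    (List.replicate full.length '-')

def saveTrueFragAligns_alt (frags : List (String × String)) (sequences : List (String × String)) : List (String × String) :=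
  let fragsD := PySem.Dict.ofList frags
  (fragsD.keys.foldl (fun al tag =>
      al.insert tag (String.ofList (pvFragB (fragsD.getD tag "").toList (al.getD tag "").toList)))
    (PySem.Dict.ofList sequences)).items

-- ===== PRECONDITION & SPEC =====
-- Pre_ excludes exactly the inputs on which A raises (a fragment tag missing from sequences:
-- KeyError; a fragment of length >= 2 absent from a de-gapped sequence that has non-gap characters:
-- the find index is -1 and A's asserts fire on almost all such inputs, AssertionError) — on the rare
-- absent-fragment inputs of that shape where the asserts happen to pass, the value A returns comes
-- from the accidental -1 window and is excluded too.
def Pre_saveTrueFragAligns (frags : List (String × String)) (sequences : List (String × String)) : Prop :=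
  ∀ p ∈ (PySem.Dict.ofList frags).items,
    (PySem.Dict.ofList sequences).contains p.1 = true ∧
    (PySem.Chars.isIn p.2.toList
        (PySem.Chars.replace ((PySem.Dict.ofList sequences).getD p.1 "").toList ['-'] []) = true
     ∨ p.2.toList.length ≤ 1
     ∨ ((PySem.Dict.ofList sequences).getD p.1 "").toList.all (fun c => c = '-') = true)
instance (frags : List (String × String)) (sequences : List (String × String)) : Decidable (Pre_saveTrueFragAligns frags sequences) := by unfold Pre_saveTrueFragAligns; infer_instance

def pvWitness_saveTrueFragAligns : (List (String × String)) × (List (String × String)) :=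
  ([("t", "AC")], [("t", "A-CG")])

def Spec_saveTrueFragAligns (frags : List (String × String)) (sequences : List (String × String)) (out : List (String × String)) : Prop := out = saveTrueFragAligns_alt frags sequences
instance (frags : List (String × String)) (sequences : List (String × String)) (out : List (String × String)) : Decidable (Spec_saveTrueFragAligns frags sequences out) := by unfold Spec_saveTrueFragAligns; infer_instance

-- ===== CLAIM (what is proved, stated in full; the proofs are below) =====
def Claim_equal_saveTrueFragAligns : Prop := ∀ (frags : List (String × String)) (sequences : List (String × String)), Dom_saveTrueFragAligns frags sequences → Pre_saveTrueFragAligns frags sequences → Spec_saveTrueFragAligns frags sequences (saveTrueFragAligns frags sequences)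

-- ===== LEMMAS AND PROOFS =====

-- common description of one masked row: walk the row skipping the first s non-gap chars,
-- then keeping k non-gap chars, then blanking the rest
def pvSpec : List Char → Nat → Nat → List Char
  | [], _, _ => []
  | c :: t, s, k =>
    if c = '-' then '-' :: pvSpec t s k
    else if 0 < s then '-' :: pvSpec t (s - 1) k
    else if 0 < k then c :: pvSpec t 0 (k - 1)
    else '-' :: pvSpec t 0 0

lemma pvSpec_zero_zero (full : List Char) : pvSpec full 0 0 = List.replicate full.length '-' := by
  induction full with
  | nil => rfl
  | cons c t ih => by_cases hc : c = '-' <;> simp [pvSpec, hc, ih, List.replicate_succ]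

lemma pvSpec_gap (t : List Char) (s k : Nat) : pvSpec ('-' :: t) s k = '-' :: pvSpec t s k := by
  simp [pvSpec]

lemma pvSpec_skip {c : Char} (hc : c ≠ '-') (t : List Char) {s : Nat} (hs : 0 < s) {k : Nat} :
    pvSpec (c :: t) s k = '-' :: pvSpec t (s - 1) k := by
  simp [pvSpec, hc, hs]

lemma pvSpec_keep {c : Char} (hc : c ≠ '-') (t : List Char) {k : Nat} (hk : 0 < k) :
    pvSpec (c :: t) 0 k = c :: pvSpec t 0 (k - 1) := by
  simp [pvSpec, hc, hk]

lemma pvSpec_done {c : Char} (hc : c ≠ '-') (t : List Char) :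
    pvSpec (c :: t) 0 0 = '-' :: pvSpec t 0 0 := by
  simp [pvSpec, hc]

-- A's loop with counter state r computes pvSpec relative to the remaining window
lemma pvA_loop (n L : Nat) (full : List Char) : ∀ (r : Nat) (acc : List Char),
    (full.foldl (fun (st : Int × List Char) c =>
        if c ≠ '-' then
          if (n : Int) ≤ st.1 ∧ st.1 < (n : Int) + (L : Int) then (st.1 + 1, st.2 ++ [c])
          else (st.1 + 1, st.2 ++ ['-'])
        else (st.1, st.2 ++ ['-'])) (((r : Nat) : Int), acc)).2
      = acc ++ pvSpec full (n - r) (min L (n + L - r)) := by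
  induction full with
  | nil => intro r acc; simp [pvSpec]
  | cons c t ih =>
    intro r acc
    simp only [List.foldl_cons]
    by_cases hc : c = '-'
    · rw [if_neg (by simp [hc])]
      rw [ih r (acc ++ ['-'])]
      rw [hc, pvSpec_gap]
      simp
    · rw [if_pos hc]
      have hcast : ((r : Nat) : Int) + 1 = (((r + 1 : Nat)) : Int) := by push_cast; ring
      by_cases hw : n ≤ r ∧ r < n + L
      · rw [if_pos (by omega)]
        rw [hcast, ih (r + 1) (acc ++ [c])]
        have e0 : n - r = 0 := by omega
        have e2 : 0 < min L (n + L - r) := by omega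
        have e3 : n - (r + 1) = 0 := by omega
        have e4 : min L (n + L - (r + 1)) = min L (n + L - r) - 1 := by omega
        rw [e0, e3, e4, pvSpec_keep hc t e2]
        simp
      · rw [if_neg (by omega)]
        rw [hcast, ih (r + 1) (acc ++ ['-'])]
        by_cases hs : r < n
        · have e1 : 0 < n - r := by omega
          have e2 : n - (r + 1) = n - r - 1 := by omega
          have e3 : min L (n + L - (r + 1)) = min L (n + L - r) := by omega
          rw [e2, e3, pvSpec_skip hc t e1]
          simp
        · have e0 : n - r = 0 := by omega
          have e2 : min L (n + L - r) = 0 := by omega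
          have e3 : n - (r + 1) = 0 := by omega
          have e4 : min L (n + L - (r + 1)) = 0 := by omega
          rw [e0, e2, e3, e4, pvSpec_done hc t]
          simp

-- the non-gap position index, with a running offset
def pvPos : List Char → Nat → List Int
  | [], _ => []
  | c :: t, s => if c = '-' then pvPos t (s + 1) else ((s : Nat) : Int) :: pvPos t (s + 1)

lemma pvEnum (full : List Char) : ∀ (s : Nat),
    ((PySem.List.enumerate full ((s : Nat) : Int)).filter (fun p => p.2 ≠ '-')).map Prod.fst
      = pvPos full s := by
  induction full with
  | nil => intro s; simp [PySem.List.enumerate_nil, pvPos]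
  | cons c t ih =>
    intro s
    rw [PySem.List.enumerate_cons,
        show ((s : Nat) : Int) + 1 = (((s + 1 : Nat)) : Int) from by push_cast; ring]
    by_cases hc : c = '-'
    · subst hc
      rw [List.filter_cons_of_neg (by simp), ih (s + 1)]
      simp [pvPos]
    · rw [List.filter_cons_of_pos (by simp [hc]), List.map_cons, ih (s + 1)]
      simp [pvPos, hc]

lemma pvPos_succ (full : List Char) : ∀ (s : Nat),
    pvPos full (s + 1) = (pvPos full s).map (· + 1) := by
  induction full with
  | nil => intro s; simp [pvPos]
  | cons c t ih =>
    intro s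
    by_cases hc : c = '-' <;> simp [pvPos, hc, ih (s + 1)]

lemma pvPos_nonneg (full : List Char) : ∀ (s : Nat) (p : Int), p ∈ pvPos full s → 0 ≤ p := by
  induction full with
  | nil => intro s p h; simp [pvPos] at h
  | cons c t ih =>
    intro s p h
    by_cases hc : c = '-'
    · exact ih (s + 1) p (by simpa [pvPos, hc] using h)
    · rcases (by simpa [pvPos, hc] using h : p = ((s : Nat) : Int) ∨ p ∈ pvPos t (s + 1)) with h' | h'
      · simp [h']
      · exact ih (s + 1) p h'

lemma pvSetD_natCast {α : Type} (out : List α) (q : Nat) (v : α) :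
    PySem.List.pySetD out ((q : Nat) : Int) v = out.set q v := by
  simp only [PySem.List.pySetD, PySem.List.pySet?, PySem.List.pyIdx?]
  by_cases hq : q < out.length
  · rw [if_pos (by positivity), if_pos (by exact_mod_cast hq)]
    simp
  · rw [if_pos (by positivity), if_neg (by exact_mod_cast hq)]
    simp [List.set_eq_of_length_le (by omega : out.length ≤ q)]

-- the index-assignment loop shifted across one leading character
lemma pvShift (c : Char) (t : List Char) : ∀ (ws : List Int) (out : List Char) (x : Char),
    (∀ p ∈ ws, 0 ≤ p) →
    ((ws.map (· + 1)).foldl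
        (fun o p => PySem.List.pySetD o p (PySem.List.pyGetD (c :: t) p '-')) (x :: out))
      = x :: (ws.foldl (fun o p => PySem.List.pySetD o p (PySem.List.pyGetD t p '-')) out) := by
  intro ws
  induction ws with
  | nil => intro out x _; rfl
  | cons p ps ih =>
    intro out x h
    obtain ⟨q, rfl⟩ : ∃ q : Nat, p = ((q : Nat) : Int) :=
      ⟨p.toNat, (Int.toNat_of_nonneg (h p (by simp))).symm⟩
    have hcast : ((q : Nat) : Int) + 1 = (((q + 1 : Nat)) : Int) := by push_cast; ring
    simp only [List.map_cons, List.foldl_cons, hcast]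
    rw [pvSetD_natCast, pvSetD_natCast, PySem.List.pyGetD_natCast, PySem.List.pyGetD_natCast]
    simp only [List.getD_cons_succ, List.set_cons_succ]
    exact ih (out.set q (t.getD q '-')) x (fun p hp => h p (by simp [hp]))

lemma pvB_loop (full : List Char) : ∀ (s k : Nat),
    ((((pvPos full 0).drop s).take k).foldl
        (fun out p => PySem.List.pySetD out p (PySem.List.pyGetD full p '-'))
        (List.replicate full.length '-')) = pvSpec full s k := by
  induction full with
  | nil => intro s k; simp [pvPos, pvSpec]
  | cons c t ih =>
    intro s k
    have hrep : List.replicate (c :: t).length '-' = '-' :: List.replicate t.length '-' := by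
      simp [List.replicate_succ]
    by_cases hc : c = '-'
    · have hmap : pvPos (c :: t) 0 = (pvPos t 0).map (· + 1) := by
        simp [pvPos, hc, pvPos_succ t 0]
      rw [hmap, hrep, ← List.map_drop, ← List.map_take]
      rw [pvShift c t (((pvPos t 0).drop s).take k) _ _ (fun p hp =>
        pvPos_nonneg t 0 p (List.mem_of_mem_drop (List.mem_of_mem_take hp)))]
      rw [ih s k, hc, pvSpec_gap]
    · have hmap : pvPos (c :: t) 0 = (0 : Int) :: (pvPos t 0).map (· + 1) := by
        simp [pvPos, hc, pvPos_succ t 0]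
      rw [hmap, hrep]
      cases s with
      | succ s' =>
        rw [List.drop_succ_cons, ← List.map_drop, ← List.map_take]
        rw [pvShift c t (((pvPos t 0).drop s').take k) _ _ (fun p hp =>
          pvPos_nonneg t 0 p (List.mem_of_mem_drop (List.mem_of_mem_take hp)))]
        rw [ih s' k, pvSpec_skip hc t (Nat.succ_pos s')]
        simp
      | zero =>
        cases k with
        | zero =>
          rw [List.drop_zero, List.take_zero, List.foldl_nil, pvSpec_done hc t, pvSpec_zero_zero]
        | succ k' =>
          rw [List.drop_zero, List.take_succ_cons]
          simp only [List.foldl_cons]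
          have h0 : PySem.List.pySetD ('-' :: List.replicate t.length '-') (0 : Int)
              (PySem.List.pyGetD (c :: t) (0 : Int) '-') = c :: List.replicate t.length '-' := by
            have hz : ((0 : Nat) : Int) = (0 : Int) := by norm_num
            rw [← hz, pvSetD_natCast, PySem.List.pyGetD_natCast]
            simp
          rw [h0, ← List.map_take]
          rw [pvShift c t ((pvPos t 0).take k') _ _ (fun p hp =>
            pvPos_nonneg t 0 p (List.mem_of_mem_take hp))]
          rw [show (pvPos t 0).take k' = ((pvPos t 0).drop 0).take k' by simp]
          rw [ih 0 k', pvSpec_keep hc t (Nat.succ_pos k')]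
          simp

-- A's loop blanks everything when the row has no non-gap character
lemma pvA_allgap (idx L : Int) : ∀ (full : List Char), (∀ c ∈ full, c = '-') →
    ∀ (st1 : Int) (acc : List Char),
    (full.foldl (fun (st : Int × List Char) c =>
        if c ≠ '-' then
          if idx ≤ st.1 ∧ st.1 < idx + L then (st.1 + 1, st.2 ++ [c])
          else (st.1 + 1, st.2 ++ ['-'])
        else (st.1, st.2 ++ ['-'])) (st1, acc)).2 = acc ++ List.replicate full.length '-' := by
  intro full
  induction full with
  | nil => intro _ st1 acc; simp
  | cons c t ih =>
    intro h st1 acc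
    have hc : c = '-' := h c (by simp)
    simp only [List.foldl_cons]
    rw [if_neg (by simp [hc])]
    rw [ih (fun c hc' => h c (by simp [hc'])) st1 (acc ++ ['-'])]
    simp [List.replicate_succ]

-- A's loop blanks everything when the window lies entirely below the counter
lemma pvA_nowin (idx L : Int) (hw : idx + L ≤ 0) : ∀ (full : List Char) (r : Nat) (acc : List Char),
    (full.foldl (fun (st : Int × List Char) c =>
        if c ≠ '-' then
          if idx ≤ st.1 ∧ st.1 < idx + L then (st.1 + 1, st.2 ++ [c])
          else (st.1 + 1, st.2 ++ ['-'])
        else (st.1, st.2 ++ ['-'])) (((r : Nat) : Int), acc)).2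
      = acc ++ List.replicate full.length '-' := by
  intro full
  induction full with
  | nil => intro r acc; simp
  | cons c t ih =>
    intro r acc
    simp only [List.foldl_cons]
    by_cases hc : c = '-'
    · rw [if_neg (by simp [hc])]
      rw [ih r (acc ++ ['-'])]
      simp [List.replicate_succ]
    · rw [if_pos hc, if_neg (by omega)]
      rw [show ((r : Nat) : Int) + 1 = (((r + 1 : Nat)) : Int) from by push_cast; ring]
      rw [ih (r + 1) (acc ++ ['-'])]
      simp [List.replicate_succ]

lemma pvPos_allgap : ∀ (full : List Char), (∀ c ∈ full, c = '-') → ∀ (s : Nat), pvPos full s = [] := by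
  intro full
  induction full with
  | nil => intro _ s; rfl
  | cons c t ih =>
    intro h s
    have hc : c = '-' := h c (by simp)
    simp [pvPos, hc, ih (fun c hc' => h c (by simp [hc'])) (s + 1)]

lemma pvSlice_nil (a? b? : Option Int) : PySem.List.slice ([] : List Int) a? b? = [] := by
  simp [PySem.List.slice]

lemma pvSlice_to_zero (xs : List Int) (a : Int) : PySem.List.slice xs (some a) (some 0) = [] := by
  simp [PySem.List.slice]

-- the two row computations agree whenever the fragment occurs in the de-gapped row
lemma pvFrag_eq (frag full : List Char)
    (h : PySem.Chars.isIn frag (PySem.Chars.replace full ['-'] []) = true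
         ∨ frag.length ≤ 1 ∨ full.all (fun c => c = '-') = true) :
    pvFragA frag full = pvFragB frag full := by
  by_cases hin : PySem.Chars.isIn frag (PySem.Chars.replace full ['-'] []) = true
  · have hinf := (PySem.Chars.isIn_iff_infix _ _).mp hin
    have h0 : 0 ≤ PySem.Chars.find (PySem.Chars.replace full ['-'] []) frag :=
      (PySem.Chars.find_nonneg_iff _ _).mpr hinf
    obtain ⟨n, hn⟩ : ∃ n : Nat, PySem.Chars.find (PySem.Chars.replace full ['-'] []) frag = ((n : Nat) : Int) :=
      ⟨_, (Int.toNat_of_nonneg h0).symm⟩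
    have hA : pvFragA frag full = pvSpec full n frag.length := by
      show (full.foldl _ ((0 : Int), ([] : List Char))).2 = _
      rw [show ((0 : Int), ([] : List Char)) = ((((0 : Nat) : Int)), ([] : List Char)) by norm_num]
      simp only [hn]
      rw [pvA_loop n frag.length full 0 []]
      simp
    have hB : pvFragB frag full = pvSpec full n frag.length := by
      show (PySem.List.slice _ _ _).foldl _ _ = _
      rw [hn, show ((0 : Int)) = (((0 : Nat) : Int)) by norm_num, pvEnum full 0]
      rw [PySem.List.slice_toNat (pvPos full 0) (by omega) (by omega)]
      have e1 : (((n : Nat) : Int)).toNat = n := by omega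
      have e2 : (((n : Nat) : Int) + (frag.length : Int)).toNat = n + frag.length := by omega
      rw [e1, e2, show n + frag.length - n = frag.length by omega]
      exact pvB_loop full n frag.length
    rw [hA, hB]
  · have hfind : PySem.Chars.find (PySem.Chars.replace full ['-'] []) frag = -1 :=
      (PySem.Chars.find_eq_neg_one_iff _ _).mpr
        (fun hinf => hin ((PySem.Chars.isIn_iff_infix _ _).mpr hinf))
    by_cases hgap : full.all (fun c => c = '-') = true
    · have hg : ∀ c ∈ full, c = '-' := by simpa using hgap
      have hA : pvFragA frag full = List.replicate full.length '-' := by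
        show (full.foldl _ ((0 : Int), ([] : List Char))).2 = _
        rw [hfind]
        simpa using pvA_allgap (-1) ((frag.length : Nat) : Int) full hg 0 []
      have hB : pvFragB frag full = List.replicate full.length '-' := by
        show (PySem.List.slice _ _ _).foldl _ _ = _
        rw [hfind, show ((0 : Int)) = (((0 : Nat) : Int)) by norm_num, pvEnum full 0,
            pvPos_allgap full hg 0, pvSlice_nil]
        rfl
      rw [hA, hB]
    · have hne : frag ≠ [] := fun he => hin (by rw [he]; exact PySem.Chars.isIn_nil _)
      have hL1 : frag.length = 1 := by
        rcases h with h | h | h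
        · exact absurd h hin
        · have := List.length_pos_of_ne_nil hne
          omega
        · exact absurd h hgap
      have hA : pvFragA frag full = List.replicate full.length '-' := by
        show (full.foldl _ ((0 : Int), ([] : List Char))).2 = _
        rw [hfind, show ((0 : Int), ([] : List Char)) = ((((0 : Nat) : Int)), ([] : List Char)) by norm_num]
        simpa using pvA_nowin (-1) ((frag.length : Nat) : Int) (by omega) full 0 []
      have hB : pvFragB frag full = List.replicate full.length '-' := by
        show (PySem.List.slice _ _ _).foldl _ _ = _
        rw [hfind, show (-1 + ((frag.length : Nat) : Int)) = (0 : Int) from by rw [hL1]; norm_num]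
        rw [pvSlice_to_zero]
        rfl
      rw [hA, hB]

-- the outer dict loop: both sides insert the same row for every processed tag
lemma pvOuter (fragsD : PySem.Dict String String) :
    ∀ (ts : List String) (al : PySem.Dict String String), ts.Nodup →
    (∀ tag ∈ ts, PySem.Chars.isIn (fragsD.getD tag "").toList
        (PySem.Chars.replace (al.getD tag "").toList ['-'] []) = true
      ∨ (fragsD.getD tag "").toList.length ≤ 1
      ∨ (al.getD tag "").toList.all (fun c => c = '-') = true) →
    (ts.foldl (fun al tag =>
        al.insert tag (String.ofList (pvFragA (fragsD.getD tag "").toList (al.getD tag "").toList))) al)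
      = (ts.foldl (fun al tag =>
        al.insert tag (String.ofList (pvFragB (fragsD.getD tag "").toList (al.getD tag "").toList))) al) := by
  intro ts
  induction ts with
  | nil => intro al _ _; rfl
  | cons t rest ih =>
    intro al hnd h
    simp only [List.foldl_cons]
    rw [← pvFrag_eq _ _ (h t (by simp))]
    apply ih _ (hnd.of_cons)
    intro tag htag
    rw [PySem.Dict.getD_insert_of_ne _ _ _ (by intro he; subst he; exact (List.nodup_cons.mp hnd).1 htag)]
    exact h tag (by simp [htag])

-- ===== VERDICT (by name: the statement is the Claim_ definition above) =====
theorem saveTrueFragAligns_spec : Claim_equal_saveTrueFragAligns := by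
  intro frags sequences _ hpre
  unfold Spec_saveTrueFragAligns saveTrueFragAligns saveTrueFragAligns_alt
  simp only []
  congr 1
  apply pvOuter
  · exact PySem.Dict.nodup_keys_ofList frags
  · intro tag htag
    have htag' : ∃ v, (tag, v) ∈ (PySem.Dict.ofList frags).items := by
      simpa [PySem.Dict.keys] using htag
    obtain ⟨v, hmem⟩ := htag'
    have hval : (PySem.Dict.ofList frags).getD tag "" = v :=
      PySem.Dict.getD_of_mem_items _ hmem (PySem.Dict.nodup_keys_ofList frags) ""
    rw [hval]
    exact (hpre (tag, v) hmem).2
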